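-- pv_equiv track=rewrite | github.com/xnscdev/LH-STEVE | lh_steve/datasets.py | split_runs
-- ===== SOURCE A (Python) =====
-- def split_runs(runs, n_splits):
--     splits = [[] for _ in range(n_splits)]
--     sizes = [0 for _ in range(n_splits)]
--     for run in runs:
--         _, length = run
--         i = min(range(n_splits), key=lambda i: sizes[i])
--         splits[i].append(run)
--         sizes[i] += length
--     return splits
-- ===== SOURCE B (Python) =====
-- def split_runs(runs, n_splits):
--     splits = [[] for _ in range(n_splits)]
--     # bins kept sorted by (size, index); the front is always the least-loaded bin
--     order = [(0, i) for i in range(n_splits)]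
--     for run in runs:
--         size, i = order[0]
--         splits[i].append(run)
--         new = (size + run[1], i)
--         order = order[1:]
--         j = 0
--         while j < len(order) and order[j] < new:
--             j += 1
--         order.insert(j, new)
--     return splits
-- ===== Notes on version B (the rewrite author's own statement) =====
-- stated objective: alternative
-- what changed: B replaces A's per-run linear argmin scan over the sizes array with a sorted list of (size, index) pairs: the least-loaded bin is popped from the front and re-inserted at its new sorted position, so no argmin scan remains.
import Mathlib
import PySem

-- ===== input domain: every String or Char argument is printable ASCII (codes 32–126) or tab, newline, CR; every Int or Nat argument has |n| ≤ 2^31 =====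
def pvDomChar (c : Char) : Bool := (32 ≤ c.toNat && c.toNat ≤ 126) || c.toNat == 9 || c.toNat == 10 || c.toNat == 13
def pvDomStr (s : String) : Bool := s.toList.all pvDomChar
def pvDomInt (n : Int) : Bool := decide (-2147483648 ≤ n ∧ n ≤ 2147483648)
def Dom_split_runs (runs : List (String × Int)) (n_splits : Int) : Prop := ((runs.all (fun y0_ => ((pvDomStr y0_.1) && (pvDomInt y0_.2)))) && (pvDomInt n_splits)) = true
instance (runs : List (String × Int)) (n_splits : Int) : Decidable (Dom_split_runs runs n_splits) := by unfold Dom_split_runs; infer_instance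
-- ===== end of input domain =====

-- B keeps the bins in a list sorted by (size, index) and pops/re-inserts the front instead of
-- A's linear argmin scan per run; equal return value on all inputs where A returns (Pre_).

-- ===== PORT A =====
-- Python's min(iterable, key=f): fold keeping the FIRST element with minimal key (strict '<' to replace);
-- none on the empty list (Python raises ValueError there). Exact port of the builtin.
def pyMinBy (key : Int → Int) : List Int → Option Int
  | [] => none
  | x :: xs => some (xs.foldl (fun best y => if key y < key best then y else best) x)

-- one iteration of A's 'for run in runs' loop; state = (splits, sizes)
def stepA (n_splits : Int) (st : List (List (String × Int)) × List Int) (run : String × Int) :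
    List (List (String × Int)) × List Int :=
  -- '.getD 0' is reached only when range(n_splits) is empty, where Python A raises (outside Pre_)
  let i := ((pyMinBy (fun j => PySem.List.pyGetD st.2 j 0) (PySem.List.pyRange 0 n_splits 1)).getD 0).toNat
  (st.1.set i (st.1.getD i [] ++ [run]), st.2.set i (st.2.getD i 0 + run.2))

def split_runs (runs : List (String × Int)) (n_splits : Int) : List (List (String × Int)) :=
  let splits0 : List (List (String × Int)) := (PySem.List.pyRange 0 n_splits 1).map (fun _ => [])
  let sizes0 : List Int := (PySem.List.pyRange 0 n_splits 1).map (fun _ => 0)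
  (runs.foldl (stepA n_splits) (splits0, sizes0)).1

-- ===== PORT B =====
-- Python's '<' on int pairs: lexicographic
def lexLt (a b : Int × Int) : Bool := a.1 < b.1 || (a.1 == b.1 && a.2 < b.2)

-- B's 'j = 0; while j < len(order) and order[j] < new: j += 1; order.insert(j, new)'
def insLex (x : Int × Int) : List (Int × Int) → List (Int × Int)
  | [] => [x]
  | y :: ys => if lexLt y x then y :: insLex x ys else x :: y :: ys

-- one iteration of B's loop; state = (splits, order)
def stepB (st : List (List (String × Int)) × List (Int × Int)) (run : String × Int) :
    List (List (String × Int)) × List (Int × Int) :=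
  match st.2 with
  | [] => st   -- Python B raises IndexError at 'order[0]' here (outside Pre_)
  | (size, i) :: rest =>
    (st.1.set i.toNat (st.1.getD i.toNat [] ++ [run]), insLex (size + run.2, i) rest)

def split_runs_alt (runs : List (String × Int)) (n_splits : Int) : List (List (String × Int)) :=
  let splits0 : List (List (String × Int)) := (PySem.List.pyRange 0 n_splits 1).map (fun _ => [])
  let order0 : List (Int × Int) := (PySem.List.pyRange 0 n_splits 1).map (fun i => ((0 : Int), i))
  (runs.foldl stepB (splits0, order0)).1

-- ===== PRECONDITION & SPEC =====
-- Pre_ excludes exactly the inputs where Python A raises: runs nonempty with n_splits ≤ 0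
-- (min() of an empty range raises ValueError; B raises IndexError there too).
def Pre_split_runs (runs : List (String × Int)) (n_splits : Int) : Prop :=
  runs = [] ∨ 1 ≤ n_splits
instance (runs : List (String × Int)) (n_splits : Int) : Decidable (Pre_split_runs runs n_splits) := by
  unfold Pre_split_runs; infer_instance

def pvWitness_split_runs : (List (String × Int)) × Int := ([("a", 3), ("b", 1), ("c", 2)], 2)

def Spec_split_runs (runs : List (String × Int)) (n_splits : Int) (out : List (List (String × Int))) : Prop := out = split_runs_alt runs n_splits
instance (runs : List (String × Int)) (n_splits : Int) (out : List (List (String × Int))) : Decidable (Spec_split_runs runs n_splits out) := by unfold Spec_split_runs; infer_instance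

-- ===== CLAIM (what is proved, stated in full; the proofs are below) =====
def Claim_equal_split_runs : Prop := ∀ (runs : List (String × Int)) (n_splits : Int), Dom_split_runs runs n_splits → Pre_split_runs runs n_splits → Spec_split_runs runs n_splits (split_runs runs n_splits)

-- ===== LEMMAS AND PROOFS =====

-- non-strict lexicographic order on pairs (Prop form)
def lexLe (a b : Int × Int) : Prop := a.1 < b.1 ∨ (a.1 = b.1 ∧ a.2 ≤ b.2)

theorem lexLe_refl (a : Int × Int) : lexLe a a := Or.inr ⟨rfl, le_refl _⟩

theorem lexLe_of_not_lexLt {a b : Int × Int} (h : ¬ lexLt a b = true) : lexLe b a := by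
  simp [lexLt] at h
  rcases lt_trichotomy b.1 a.1 with h1 | h1 | h1
  · exact Or.inl h1
  · exact Or.inr ⟨h1, by omega⟩
  · exact absurd h1 (by omega)

theorem lexLe_of_lexLt {a b : Int × Int} (h : lexLt a b = true) : lexLe a b := by
  simp [lexLt] at h
  rcases h with h | h
  · exact Or.inl h
  · exact Or.inr ⟨h.1, le_of_lt h.2⟩

theorem mem_insLex {z x : Int × Int} : ∀ {l : List (Int × Int)}, z ∈ insLex x l → z = x ∨ z ∈ l := by
  intro l
  induction l with
  | nil => intro h; simp [insLex] at h; exact Or.inl h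
  | cons y ys ih =>
    intro h
    simp only [insLex] at h
    split at h
    · rcases List.mem_cons.1 h with h | h
      · exact Or.inr (h ▸ List.mem_cons_self)
      · rcases ih h with h | h
        · exact Or.inl h
        · exact Or.inr (List.mem_cons_of_mem _ h)
    · rcases List.mem_cons.1 h with h | h
      · exact Or.inl h
      · exact Or.inr h

theorem pairwise_insLex {x : Int × Int} : ∀ {l : List (Int × Int)},
    l.Pairwise lexLe → (∀ y ∈ l, ¬ lexLt y x = true → lexLe x y) → (insLex x l).Pairwise lexLe := by
  intro l
  induction l with
  | nil => intro _ _; simp [insLex]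
  | cons y ys ih =>
    intro hp hx
    simp only [insLex]
    split
    · rename_i hlt
      refine List.pairwise_cons.2 ⟨?_, ih (List.pairwise_cons.1 hp).2 (fun z hz hn => hx z (List.mem_cons_of_mem _ hz) hn)⟩
      intro z hz
      rcases mem_insLex hz with h | h
      · exact h ▸ lexLe_of_lexLt hlt
      · exact (List.pairwise_cons.1 hp).1 z h
    · rename_i hlt
      refine List.pairwise_cons.2 ⟨?_, hp⟩
      intro z hz
      rcases List.mem_cons.1 hz with h | h
      · exact h ▸ hx y List.mem_cons_self hlt
      · rcases hx y List.mem_cons_self hlt with h1 | h1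
        · rcases (List.pairwise_cons.1 hp).1 z h with h2 | h2
          · exact Or.inl (lt_trans h1 h2)
          · exact Or.inl (h2.1 ▸ h1)
        · rcases (List.pairwise_cons.1 hp).1 z h with h2 | h2
          · exact Or.inl (h1.1 ▸ h2)
          · exact Or.inr ⟨h1.1.trans h2.1, le_trans h1.2 h2.2⟩

theorem perm_insLex (x : Int × Int) : ∀ (l : List (Int × Int)), (insLex x l).Perm (x :: l) := by
  intro l
  induction l with
  | nil => simp [insLex]
  | cons y ys ih =>
    simp only [insLex]
    split
    · exact (List.Perm.cons y ih).trans (List.Perm.swap x y ys)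
    · exact List.Perm.refl _

-- the (value, index) view of the sizes array, indices as Int
def pairs (sizes : List Int) : List (Int × Int) := sizes.zipIdx.map (fun p => (p.1, (p.2 : Int)))

theorem length_pairs (sizes : List Int) : (pairs sizes).length = sizes.length := by
  simp [pairs]

theorem getElem_pairs (sizes : List Int) (k : Nat) (h : k < sizes.length) :
    (pairs sizes)[k]'(by simp [length_pairs]; omega) = (sizes[k], (k : Int)) := by
  simp [pairs]

theorem mem_pairs_iff {p : Int × Int} {sizes : List Int} :
    p ∈ pairs sizes ↔ ∃ k, ∃ h : k < sizes.length, p = (sizes[k], (k : Int)) := by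
  constructor
  · intro h
    rcases List.getElem_of_mem h with ⟨k, hk, hget⟩
    have hk' : k < sizes.length := by simpa [length_pairs] using hk
    exact ⟨k, hk', by rw [← hget, getElem_pairs sizes k hk']⟩
  · rintro ⟨k, hk, rfl⟩
    have := getElem_pairs sizes k hk
    rw [← this]
    exact List.getElem_mem _

theorem pairs_set (sizes : List Int) (k : Nat) (v : Int) (h : k < sizes.length) :
    pairs (sizes.set k v) = (pairs sizes).set k (v, (k : Int)) := by
  apply List.ext_getElem
  · simp [length_pairs]
  · intro i h1 h2
    have hi : i < sizes.length := by simp [length_pairs] at h1; omega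
    by_cases hik : i = k
    · subst hik
      rw [getElem_pairs _ i (by simpa using hi), List.getElem_set_self (by simpa [length_pairs] using hi)]
      simp
    · have e1 := getElem_pairs (sizes.set k v) i (by simpa using hi)
      have e2 : (sizes.set k v)[i]'(by simpa using hi) = sizes[i]'hi :=
        List.getElem_set_ne (by omega) _
      have e3 : ((pairs sizes).set k (v, (k : Int)))[i]'h2 = (pairs sizes)[i]'(by rw [length_pairs]; omega) :=
        List.getElem_set_ne (by omega) _
      rw [e1, e2, e3, getElem_pairs _ i hi]

theorem set_perm_cons_eraseIdx {α : Type} : ∀ (l : List α) (k : Nat) (v : α), k < l.length →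
    (l.set k v).Perm (v :: l.eraseIdx k) := by
  intro l
  induction l with
  | nil => intro k v h; simp at h
  | cons x xs ih =>
    intro k v h
    cases k with
    | zero => simp
    | succ k =>
      simp only [List.set_cons_succ, List.eraseIdx_cons_succ]
      exact (List.Perm.cons x (ih k v (by simpa using h))).trans (List.Perm.swap v x _)

-- fold of Python's min: if nothing beats b, the result is b
theorem foldMin_keep (key : Int → Int) : ∀ (l : List Int) (b : Int), (∀ y ∈ l, key b ≤ key y) →
    l.foldl (fun best y => if key y < key best then y else best) b = b := by
  intro l
  induction l with
  | nil => intro b _; rfl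
  | cons y ys ih =>
    intro b hb
    simp only [List.foldl_cons]
    rw [if_neg (by exact not_lt.2 (hb y List.mem_cons_self))]
    exact ih b (fun z hz => hb z (List.mem_cons_of_mem _ hz))

-- fold of Python's min: i strictly beats b and everything before it, and is ≤ everything after it
theorem foldMin_pick (key : Int → Int) : ∀ (l₁ : List Int) (l₂ : List Int) (b i : Int),
    key i < key b → (∀ y ∈ l₁, key i < key y) → (∀ y ∈ l₂, key i ≤ key y) →
    (l₁ ++ i :: l₂).foldl (fun best y => if key y < key best then y else best) b = i := by
  intro l₁
  induction l₁ with
  | nil =>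
    intro l₂ b i hb _ h2
    simp only [List.nil_append, List.foldl_cons]
    rw [if_pos hb]
    exact foldMin_keep key l₂ i h2
  | cons y ys ih =>
    intro l₂ b i hb h1 h2
    simp only [List.cons_append, List.foldl_cons]
    have hy : key i < key y := h1 y List.mem_cons_self
    by_cases h : key y < key b
    · rw [if_pos h]
      exact ih l₂ y i hy (fun z hz => h1 z (List.mem_cons_of_mem _ hz)) h2
    · rw [if_neg h]
      exact ih l₂ b i hb (fun z hz => h1 z (List.mem_cons_of_mem _ hz)) h2

-- the invariant tying A's sizes array to B's sorted order list
def InvSO (sizes : List Int) (order : List (Int × Int)) : Prop :=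
  order.Pairwise lexLe ∧ order.Perm (pairs sizes)

theorem pyMinBy_cons (key : Int → Int) (x : Int) (xs : List Int) :
    pyMinBy key (x :: xs) = some (xs.foldl (fun best y => if key y < key best then y else best) x) := rfl

-- the head of order is least: ∀ entries of pairs sizes, lexLe (s,i)
theorem head_min_of_inv {sizes : List Int} {s i : Int} {rest : List (Int × Int)}
    (hinv : InvSO sizes ((s, i) :: rest)) :
    ∀ p ∈ pairs sizes, lexLe (s, i) p := by
  intro p hp
  have hmem : p ∈ (s, i) :: rest := hinv.2.mem_iff.2 hp
  rcases List.mem_cons.1 hmem with h | h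
  · exact h ▸ lexLe_refl _
  · exact (List.pairwise_cons.1 hinv.1).1 p h

-- A's min(range(n), key=sizes.__getitem__) picks exactly the head index of B's sorted order list
theorem pyMinBy_of_inv {n : Int} {sizes : List Int} {s i : Int} {rest : List (Int × Int)}
    (hn : 1 ≤ n) (hlen : sizes.length = n.toNat)
    (hinv : InvSO sizes ((s, i) :: rest)) :
    0 ≤ i ∧ i.toNat < sizes.length ∧ sizes.getD i.toNat 0 = s ∧
    pyMinBy (fun j => PySem.List.pyGetD sizes j 0) (PySem.List.pyRange 0 n 1) = some i := by
  have hmem : (s, i) ∈ pairs sizes := hinv.2.subset List.mem_cons_self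
  rcases mem_pairs_iff.1 hmem with ⟨k, hk, hks⟩
  have hsk : s = sizes[k] := by rw [Prod.mk.injEq] at hks; exact hks.1
  have hik : i = (k : Int) := by rw [Prod.mk.injEq] at hks; exact hks.2
  have hitn : i.toNat = k := by omega
  have hmin : ∀ m : Nat, m < sizes.length →
      sizes.getD k 0 < sizes.getD m 0 ∨ (sizes.getD k 0 = sizes.getD m 0 ∧ k ≤ m) := by
    intro m hm
    have h := head_min_of_inv hinv (sizes[m], (m : Int)) (mem_pairs_iff.2 ⟨m, hm, rfl⟩)
    rw [List.getD_eq_getElem sizes 0 hk, List.getD_eq_getElem sizes 0 hm]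
    rcases h with h | h
    · exact Or.inl (hsk ▸ h)
    · refine Or.inr ⟨hsk ▸ h.1, ?_⟩
      have := h.2; rw [hik] at this; omega
  have hkey : ∀ j : Int, 0 ≤ j → PySem.List.pyGetD sizes j 0 = sizes.getD j.toNat 0 :=
    fun j hj => PySem.List.pyGetD_of_nonneg sizes 0 hj
  refine ⟨by omega, by omega, by rw [hitn, List.getD_eq_getElem sizes 0 hk]; exact hsk.symm, ?_⟩
  have hkn : (k : Int) < n := by omega
  rw [PySem.List.pyRange_one_cons (by omega : (0 : Int) < n), hik, pyMinBy_cons,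
    Option.some_inj, show (0 : Int) + 1 = 1 from rfl]
  by_cases hk0 : k = 0
  · subst hk0
    rw [show ((0 : Nat) : Int) = 0 from rfl]
    refine foldMin_keep _ _ _ ?_
    intro y hy
    rw [PySem.List.mem_pyRange_one] at hy
    rw [hkey 0 (by omega), hkey y (by omega)]
    have := hmin y.toNat (by omega)
    simp only [Int.toNat_zero] at *
    omega
  · have hsplit : PySem.List.pyRange 1 n = PySem.List.pyRange 1 (k : Int) ++ (k : Int) :: PySem.List.pyRange ((k : Int) + 1) n := by
      rw [PySem.List.pyRange_one_append 1 (k : Int) n (by omega) (by omega),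
        PySem.List.pyRange_one_cons (by omega : (k : Int) < n)]
    rw [hsplit]
    refine foldMin_pick _ _ _ _ _ ?_ ?_ ?_
    · rw [hkey (k : Int) (by omega), hkey 0 (by omega)]
      simp only [Int.toNat_natCast, Int.toNat_zero]
      have := hmin 0 (by omega)
      omega
    · intro y hy
      rw [PySem.List.mem_pyRange_one] at hy
      rw [hkey (k : Int) (by omega), hkey y (by omega)]
      simp only [Int.toNat_natCast]
      have := hmin y.toNat (by omega)
      omega
    · intro y hy
      rw [PySem.List.mem_pyRange_one] at hy
      rw [hkey (k : Int) (by omega), hkey y (by omega)]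
      simp only [Int.toNat_natCast]
      have := hmin y.toNat (by omega)
      omega

-- one loop iteration: the two steps produce equal splits and re-establish InvSO
theorem step_eq {n : Int} {splits : List (List (String × Int))} {sizes : List Int}
    {order : List (Int × Int)} (run : String × Int)
    (hn : 1 ≤ n) (hlen : sizes.length = n.toNat) (hinv : InvSO sizes order) :
    (stepA n (splits, sizes) run).1 = (stepB (splits, order) run).1 ∧
    (stepA n (splits, sizes) run).2.length = n.toNat ∧
    InvSO (stepA n (splits, sizes) run).2 (stepB (splits, order) run).2 := by
  rcases order with _ | ⟨⟨s, i⟩, rest⟩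
  · exfalso
    have := hinv.2.length_eq
    rw [length_pairs] at this
    simp at this
    omega
  · obtain ⟨hi0, hk, hs, hmb⟩ := pyMinBy_of_inv hn hlen hinv
    have hkInt : (i.toNat : Int) = i := Int.toNat_of_nonneg hi0
    simp only [stepA, stepB, hmb, Option.getD_some]
    refine ⟨by trivial, by simp [hlen], ?_, ?_⟩
    · exact pairwise_insLex (List.pairwise_cons.1 hinv.1).2
        (fun y _ hy => lexLe_of_not_lexLt hy)
    · -- permutation part of the invariant
      have hget : sizes[i.toNat]'hk = s := by
        rw [← List.getD_eq_getElem sizes 0 hk]; exact hs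
      have hpair : (pairs sizes)[i.toNat]'(by rw [length_pairs]; exact hk) = (s, i) := by
        rw [getElem_pairs sizes i.toNat hk, hget, hkInt]
      have hsetself : (pairs sizes).set i.toNat (s, i) = pairs sizes := by
        rw [← hpair]
        exact List.set_getElem_self (by rw [length_pairs]; exact hk)
      have h1 : (pairs sizes).Perm ((s, i) :: (pairs sizes).eraseIdx i.toNat) := by
        conv_lhs => rw [← hsetself]
        exact set_perm_cons_eraseIdx _ _ _ (by rw [length_pairs]; exact hk)
      have hrest : rest.Perm ((pairs sizes).eraseIdx i.toNat) := (hinv.2.trans h1).cons_inv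
      have hnewpairs : (pairs (sizes.set i.toNat (sizes.getD i.toNat 0 + run.2))).Perm
          ((s + run.2, i) :: (pairs sizes).eraseIdx i.toNat) := by
        rw [pairs_set _ _ _ hk, hkInt, hs]
        exact set_perm_cons_eraseIdx _ _ _ (by rw [length_pairs]; exact hk)
      refine (perm_insLex _ _).trans ((hrest.cons _).trans ?_)
      exact hnewpairs.symm

theorem main_fold {n : Int} (hn : 1 ≤ n) : ∀ (runs : List (String × Int))
    (splits : List (List (String × Int))) (sizes : List Int) (order : List (Int × Int)),
    sizes.length = n.toNat → InvSO sizes order →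
    (runs.foldl (stepA n) (splits, sizes)).1 = (runs.foldl stepB (splits, order)).1 := by
  intro runs
  induction runs with
  | nil => intro splits sizes order _ _; rfl
  | cons r rs ih =>
    intro splits sizes order hlen hinv
    obtain ⟨h1, h2, h3⟩ := step_eq r hn hlen hinv
    simp only [List.foldl_cons]
    have e1 : stepB (splits, order) r = ((stepA n (splits, sizes) r).1, (stepB (splits, order) r).2) :=
      Prod.ext h1.symm rfl
    have e2 : stepA n (splits, sizes) r = ((stepA n (splits, sizes) r).1, (stepA n (splits, sizes) r).2) := rfl
    rw [e1, e2]
    exact ih _ _ _ h2 h3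

theorem inv_init (n : Int) :
    ((PySem.List.pyRange 0 n 1).map (fun i => ((0 : Int), i))) = pairs ((PySem.List.pyRange 0 n 1).map (fun _ => 0)) ∧
    (((PySem.List.pyRange 0 n 1).map (fun i => ((0 : Int), i)))).Pairwise lexLe := by
  constructor
  · apply List.ext_getElem
    · simp [length_pairs]
    · intro m h1 h2
      have hm : m < (PySem.List.pyRange 0 n 1).length := by simpa using h1
      rw [List.getElem_map, getElem_pairs _ m (by simpa using hm), List.getElem_map,
        PySem.List.getElem_pyRange_one]
      simp
  · exact List.Pairwise.map _ (fun a b h => Or.inr ⟨rfl, le_of_lt h⟩)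
      (PySem.List.pairwise_lt_pyRange_one 0 n)

-- ===== VERDICT (by name: the statement is the Claim_ definition above) =====
theorem split_runs_spec : Claim_equal_split_runs := by
  intro runs n _ hpre
  unfold Spec_split_runs split_runs split_runs_alt
  cases runs with
  | nil => rfl
  | cons r rs =>
    have hn : 1 ≤ n := by
      rcases hpre with h | h
      · exact absurd h (by simp)
      · exact h
    obtain ⟨hpairs, hpw⟩ := inv_init n
    exact main_fold hn (r :: rs) _ _ _ (by simp [PySem.List.length_pyRange_one]) ⟨hpw, hpairs ▸ List.Perm.refl _⟩
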